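-- pv_equiv track=rewrite | github.com/Samuel1043/mirtarsite | utils_annotate.py | add_site_id
-- ===== SOURCE A (Python) =====
-- def add_site_id(sites):
--     '''
--     add site id for site level site data
--     '''
--     tmp=[]
--     cnt=0
--     prev_id=''
--     for site in sites:
--         if(site!=prev_id):
--             cnt=0
--         siteid=site+'_site_'+str(cnt)
--         tmp.append(siteid)
--         prev_id=site
--         cnt+=1
--     return tmp
-- ===== SOURCE B (Python) =====
-- def add_site_id(sites):
--     out = []
--     i = 0
--     n = len(sites)
--     while i < n:
--         j = i + 1
--         while j < n and sites[j] == sites[i]: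
--             j += 1
--         out += [sites[i] + '_site_' + str(k) for k in range(j - i)]
--         i = j
--     return out
-- ===== Notes on version B (the rewrite author's own statement) =====
-- stated objective: alternative
-- what changed: Replaces the prev_id/cnt state machine with a two-level grouped traversal: an outer loop finds each run of consecutive equal sites, then a comprehension emits key+'_site_'+i for i in range(run length).
import Mathlib
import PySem

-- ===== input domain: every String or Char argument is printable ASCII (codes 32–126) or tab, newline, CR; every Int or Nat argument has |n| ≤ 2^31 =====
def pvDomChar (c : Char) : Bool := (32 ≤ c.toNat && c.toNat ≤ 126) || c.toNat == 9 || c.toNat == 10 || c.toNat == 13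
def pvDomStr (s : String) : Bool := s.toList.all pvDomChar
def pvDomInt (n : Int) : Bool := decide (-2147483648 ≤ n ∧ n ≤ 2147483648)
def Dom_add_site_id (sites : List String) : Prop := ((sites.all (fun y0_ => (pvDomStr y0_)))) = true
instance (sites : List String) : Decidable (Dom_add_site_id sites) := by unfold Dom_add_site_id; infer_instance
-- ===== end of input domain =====

-- B replaces A's prev_id/cnt state machine with a two-level grouped traversal
-- (find each run of consecutive equal sites, then emit key+'_site_'+i per run);
-- objective: alternative decomposition, same cost.

-- ===== PORT A =====
-- the for loop of A, state (tmp, cnt, prev_id)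
def pvAGo : List String → List String → Int → String → List String
  | [], tmp, _cnt, _prev => tmp
  | site :: rest, tmp, cnt, prev =>
    let cnt := if site ≠ prev then 0 else cnt
    let siteid := site ++ "_site_" ++ PySem.Int.toStr cnt
    pvAGo rest (tmp ++ [siteid]) (cnt + 1) site

def add_site_id (sites : List String) : List String := pvAGo sites [] 0 ""

-- ===== PORT B =====
-- B's inner while loop: length of the prefix of the remaining list equal to the run head
def pvRun (h : String) : List String → Nat
  | [] => 0
  | x :: xs => if x == h then pvRun h xs + 1 else 0

-- B's outer while loop: one step per run; emits the run's ids via range, then continues past it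
def add_site_id_alt : List String → List String
  | [] => []
  | s :: rest =>
    ((List.range (pvRun s rest + 1)).map (fun (k : Nat) => s ++ "_site_" ++ PySem.Int.toStr (k : Int)))
      ++ add_site_id_alt (rest.drop (pvRun s rest))
termination_by sites => sites.length
decreasing_by simp [List.length_drop]

-- ===== PRECONDITION & SPEC =====
def Spec_add_site_id (sites : List String) (out : List String) : Prop := out = add_site_id_alt sites
instance (sites : List String) (out : List String) : Decidable (Spec_add_site_id sites out) := by unfold Spec_add_site_id; infer_instance

-- ===== CLAIM (what is proved, stated in full; the proofs are below) =====
def Claim_equal_add_site_id : Prop := ∀ (sites : List String), Dom_add_site_id sites → Spec_add_site_id sites (add_site_id sites)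

-- ===== LEMMAS AND PROOFS =====

def pvEmit (s : String) (cnt : Int) (n : Nat) : List String :=
  (List.range n).map (fun (k : Nat) => s ++ "_site_" ++ PySem.Int.toStr (cnt + (k : Int)))

theorem pvEmit_succ (s : String) (cnt : Int) (n : Nat) :
    pvEmit s cnt (n+1) = (s ++ "_site_" ++ PySem.Int.toStr cnt) :: pvEmit s (cnt+1) n := by
  simp only [pvEmit, List.range_succ_eq_map, List.map_cons, List.map_map, Nat.cast_zero, add_zero,
    Function.comp_def]
  congr 1
  apply List.map_congr_left
  intro k _
  congr 2
  push_cast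
  ring

theorem alt_cons (s : String) (rest : List String) :
    add_site_id_alt (s :: rest) =
      pvEmit s 0 (pvRun s rest + 1) ++ add_site_id_alt (rest.drop (pvRun s rest)) := by
  rw [add_site_id_alt.eq_2]
  congr 1
  apply List.map_congr_left
  intro k _
  simp

theorem pvAGo_acc (l : List String) (tmp : List String) (cnt : Int) (prev : String) :
    pvAGo l tmp cnt prev = tmp ++ pvAGo l [] cnt prev := by
  induction l generalizing tmp cnt prev with
  | nil => simp [pvAGo]
  | cons x xs ih =>
    simp only [pvAGo, List.nil_append]
    rw [ih, ih [_]]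
    simp

theorem pvAGo_run (l : List String) (s : String) (cnt : Int) :
    pvAGo l [] cnt s = pvEmit s cnt (pvRun s l) ++ add_site_id_alt (l.drop (pvRun s l)) := by
  induction l generalizing s cnt with
  | nil => simp [pvAGo, pvRun, pvEmit]; rw [add_site_id_alt.eq_1]
  | cons x xs ih =>
    by_cases hx : x = s
    · subst hx
      simp only [pvAGo, pvRun, if_neg (by simp : ¬ (x ≠ x)), beq_self_eq_true, if_pos,
        List.nil_append, List.drop_succ_cons]
      rw [pvAGo_acc, ih x (cnt + 1), pvEmit_succ]
      simp
    · simp only [pvAGo, pvRun, if_pos (by simpa using hx), beq_iff_eq, if_neg hx,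
        List.nil_append, List.drop_zero]
      rw [pvAGo_acc, zero_add, ih x 1, alt_cons, pvEmit_succ]
      simp [pvEmit]

theorem pvAGo_zero (sites : List String) (s : String) :
    pvAGo sites [] 0 s = add_site_id_alt sites := by
  cases sites with
  | nil => simp [pvAGo]; rw [add_site_id_alt.eq_1]
  | cons x xs =>
    by_cases hx : x = s
    · subst hx
      rw [pvAGo_run, alt_cons]
      simp [pvRun, pvEmit_succ, pvAGo_run]
    · simp only [pvAGo, if_pos (by simpa using hx), List.nil_append]
      rw [pvAGo_acc, zero_add, pvAGo_run xs x 1, alt_cons, pvEmit_succ]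
      simp

-- ===== VERDICT (by name: the statement is the Claim_ definition above) =====
theorem add_site_id_spec : Claim_equal_add_site_id := by
  intro sites _
  unfold Spec_add_site_id add_site_id
  exact pvAGo_zero sites ""
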